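-- pv_equiv track=rewrite | github.com/rolewj/steganography | lab4/lab4.py | text_to_bits
-- ===== SOURCE A (Python) =====
-- def text_to_bits(text: str) -> list[int]:
--     data = text.encode('utf-8', errors='replace')
--     bits = []
--     for byte in data:
--         for i in range(8):
--             bit = (byte >> (7 - i)) & 1
--             bits.append(bit)
--     return bits
-- ===== SOURCE B (Python) =====
-- def text_to_bits(text: str) -> list[int]:
--     data = text.encode('utf-8', errors='replace')
--     if not data:
--         return []
--     n = int.from_bytes(data, 'big')
--     return [int(ch) for ch in format(n, '0{}b'.format(8 * len(data)))]
-- ===== Notes on version B (the rewrite author's own statement) =====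
-- stated objective: alternative
-- what changed: A emits bits with nested per-byte shift loops; B collapses the whole byte string into one big integer via int.from_bytes and renders it as a zero-padded binary string in one formatting step, mapping each digit character to an int.
import Mathlib
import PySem

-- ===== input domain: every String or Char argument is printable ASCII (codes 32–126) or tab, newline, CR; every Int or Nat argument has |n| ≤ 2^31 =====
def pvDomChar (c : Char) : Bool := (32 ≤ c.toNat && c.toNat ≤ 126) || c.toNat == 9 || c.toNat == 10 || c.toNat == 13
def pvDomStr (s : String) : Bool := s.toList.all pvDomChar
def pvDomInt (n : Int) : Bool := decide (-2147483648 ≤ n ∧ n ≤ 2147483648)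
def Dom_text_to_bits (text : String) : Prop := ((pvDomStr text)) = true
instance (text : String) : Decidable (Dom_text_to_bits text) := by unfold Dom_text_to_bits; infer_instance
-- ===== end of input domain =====

-- B collapses the UTF-8 bytes into one big integer and extracts each bit positionally,
-- replacing A's nested per-byte shift loops (alternative decomposition, not claimed faster).


-- ===== PORT A =====
-- utf-8 encoding: on the ASCII domain each character encodes to the single byte of its code
-- (exact on Dom_text_to_bits, whose characters are all < 128).
def pvBytes (text : String) : List Nat := text.toList.map Char.toNat

def text_to_bits (text : String) : List Int :=
  (pvBytes text).foldl
    (fun bits byte =>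
      (List.range 8).foldl
        (fun bits i => bits ++ [(((byte >>> (7 - i)) &&& 1 : Nat) : Int)]) bits)
    []

-- ===== PORT B =====
-- binary rendering of n, most-significant digit first, as int digits
-- (= the characters of Python's format(n, 'b') mapped through int(ch); empty for n = 0)
def pvBinRep (n : Nat) : List Int :=
  if h : n = 0 then []
  else pvBinRep (n / 2) ++ [((n % 2 : Nat) : Int)]
decreasing_by exact Nat.div_lt_self (Nat.pos_of_ne_zero h) (by norm_num)

def text_to_bits_alt (text : String) : List Int :=
  let data := pvBytes text
  if data = [] then []
  else
    let n := data.foldl (fun acc b => acc * 256 + b) 0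
    let total := 8 * data.length
    -- format(n, '0{total}b') = zero-pad the binary rendering of n to width total
    let s := pvBinRep n
    List.replicate (total - s.length) 0 ++ s

-- ===== PRECONDITION & SPEC =====
def Spec_text_to_bits (text : String) (out : List Int) : Prop := out = text_to_bits_alt text
instance (text : String) (out : List Int) : Decidable (Spec_text_to_bits text out) := by unfold Spec_text_to_bits; infer_instance

-- ===== CLAIM (what is proved, stated in full; the proofs are below) =====
def Claim_equal_text_to_bits : Prop := ∀ (text : String), Dom_text_to_bits text → Spec_text_to_bits text (text_to_bits text)

-- ===== LEMMAS AND PROOFS =====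

theorem pv_foldl_concat {α β : Type} (f : α → β) (l : List α) (init : List β) :
    l.foldl (fun acc x => acc ++ [f x]) init = init ++ l.map f := by
  induction l generalizing init with
  | nil => simp
  | cons x xs ih => simp [ih]

theorem pv_A_flat (bs : List Nat) :
    bs.foldl
      (fun bits byte =>
        (List.range 8).foldl
          (fun bits i => bits ++ [(((byte >>> (7 - i)) &&& 1 : Nat) : Int)]) bits)
      []
    = bs.flatMap (fun b => (List.range 8).map (fun i => (((b >>> (7 - i)) &&& 1 : Nat) : Int))) := by
  induction bs using List.reverseRecOn with
  | nil => simp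
  | append_singleton bs b ih =>
      rw [List.foldl_append, List.flatMap_append, ← ih]
      simp only [List.foldl_cons, List.foldl_nil, List.flatMap_cons, List.flatMap_nil,
        List.append_nil, pv_foldl_concat]

theorem pv_bit_high (n b k : Nat) (hblt : b < 256) :
    (n * 256 + b) >>> (k + 8) = n >>> k := by
  simp only [Nat.shiftRight_eq_div_pow]
  have h8 : (2:Nat)^(k+8) = 256 * 2^k := by ring
  rw [h8, ← Nat.div_div_eq_div_mul]
  have : (n * 256 + b) / 256 = n := by
    rw [Nat.mul_comm n 256, Nat.mul_add_div (by norm_num)]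
    omega
  rw [this]

theorem pv_bit_low (n b k : Nat) (hk : k < 8) :
    ((n * 256 + b) >>> k) % 2 = (b >>> k) % 2 := by
  simp only [Nat.shiftRight_eq_div_pow]
  have h1 : n * 256 + b = 2^k * (n * 2^(8-k)) + b := by
    have : (2:Nat)^k * 2^(8-k) = 256 := by
      have hk8 : k + (8-k) = 8 := by omega
      rw [← pow_add, hk8]; norm_num
    calc n * 256 + b = n * (2^k * 2^(8-k)) + b := by rw [this]
      _ = 2^k * (n * 2^(8-k)) + b := by ring
  rw [h1, Nat.mul_add_div (Nat.two_pow_pos k)]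
  have he : (n * 2^(8-k)) % 2 = 0 := by
    have : n * 2^(8-k) = 2 * (n * 2^(7-k)) := by
      have : (2:Nat)^(8-k) = 2 * 2^(7-k) := by
        rw [← pow_succ']; congr 1; omega
      rw [this]; ring
    omega
  omega

-- the core identity: positional bits of the collapsed integer = concatenation of per-byte bits
theorem pv_main (bs : List Nat) (hb : ∀ b ∈ bs, b < 256) :
    (List.range (8 * bs.length)).map
      (fun i => (((bs.foldl (fun acc b => acc * 256 + b) 0 >>> (8 * bs.length - 1 - i)) &&& 1 : Nat) : Int))
    = bs.flatMap (fun b => (List.range 8).map (fun i => (((b >>> (7 - i)) &&& 1 : Nat) : Int))) := by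
  induction bs using List.reverseRecOn with
  | nil => simp
  | append_singleton bs b ih =>
      have hb' : ∀ x ∈ bs, x < 256 := fun x hx => hb x (List.mem_append_left _ hx)
      have hblt : b < 256 := hb b (by simp)
      set n := bs.foldl (fun acc b => acc * 256 + b) 0 with hn
      set T := 8 * bs.length with hT
      have hlen : 8 * (bs ++ [b]).length = T + 8 := by simp [hT]; ring
      have hfold : (bs ++ [b]).foldl (fun acc b => acc * 256 + b) 0 = n * 256 + b := by
        simp [List.foldl_append, hn]
      rw [List.flatMap_append, ← ih hb', hlen, hfold, List.range_add, List.map_append, List.map_map]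
      congr 1
      · apply List.map_congr_left
        intro i hi
        have hi' : i < T := List.mem_range.mp hi
        have hsh : T + 8 - 1 - i = (T - 1 - i) + 8 := by omega
        rw [hsh, pv_bit_high n b _ hblt]
      · simp only [List.flatMap_cons, List.flatMap_nil, List.append_nil]
        apply List.map_congr_left
        intro j hj
        simp only [Function.comp_apply]
        have hj' : j < 8 := List.mem_range.mp hj
        have hsh : T + 8 - 1 - (T + j) = 7 - j := by omega
        rw [hsh]
        congr 1
        rw [Nat.and_one_is_mod, Nat.and_one_is_mod, pv_bit_low n b _ (by omega)]

theorem pvBinRep_length_le (t : Nat) : ∀ n, n < 2^t → (pvBinRep n).length ≤ t := by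
  induction t with
  | zero =>
      intro n hn
      have : n = 0 := by omega
      subst this; rw [pvBinRep]; simp
  | succ t ih =>
      intro n hn
      by_cases h0 : n = 0
      · subst h0; rw [pvBinRep]; simp
      · rw [pvBinRep, dif_neg h0]
        have hlt : n / 2 < 2^t := by
          rw [pow_succ] at hn; omega
        have := ih (n / 2) hlt
        simp; omega

theorem pv_pad (t : Nat) : ∀ n, n < 2^t →
    List.replicate (t - (pvBinRep n).length) (0 : Int) ++ pvBinRep n
    = (List.range t).map (fun i => (((n >>> (t - 1 - i)) &&& 1 : Nat) : Int)) := by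
  induction t with
  | zero =>
      intro n hn
      have : n = 0 := by omega
      subst this; rw [pvBinRep]; simp
  | succ t ih =>
      intro n hn
      have hdiv : n / 2 < 2^t := by
        rw [pow_succ] at hn; omega
      have hstep : ∀ i, i < t →
          (((n >>> (t + 1 - 1 - i)) &&& 1 : Nat) : Int)
          = ((((n / 2) >>> (t - 1 - i)) &&& 1 : Nat) : Int) := by
        intro i hi
        congr 2
        have h1 : t + 1 - 1 - i = (t - 1 - i) + 1 := by omega
        rw [h1]
        simp only [Nat.shiftRight_eq_div_pow]
        rw [pow_succ', Nat.div_div_eq_div_mul]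
      have hlast : (((n >>> (t + 1 - 1 - t)) &&& 1 : Nat) : Int) = ((n % 2 : Nat) : Int) := by
        have : t + 1 - 1 - t = 0 := by omega
        rw [this]
        simp [Nat.and_one_is_mod]
      rw [List.range_succ, List.map_append, ← List.map_congr_left
        (fun i hi => (hstep i (List.mem_range.mp hi)).symm), ← ih (n / 2) hdiv]
      by_cases h0 : n = 0
      · subst h0
        simp [pvBinRep, List.replicate_succ']
      · rw [pvBinRep, dif_neg h0]
        have hlen := pvBinRep_length_le t (n / 2) hdiv
        simp only [List.length_append, List.length_singleton, List.map_cons, List.map_nil]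
        have harith : t + 1 - ((pvBinRep (n / 2)).length + 1) = t - (pvBinRep (n / 2)).length := by
          omega
        rw [harith, hlast, ← List.append_assoc]

theorem pv_val_lt (bs : List Nat) (hb : ∀ b ∈ bs, b < 256) :
    bs.foldl (fun acc b => acc * 256 + b) 0 < 2^(8 * bs.length) := by
  induction bs using List.reverseRecOn with
  | nil => simp
  | append_singleton bs b ih =>
      have hb' : ∀ x ∈ bs, x < 256 := fun x hx => hb x (List.mem_append_left _ hx)
      have hblt : b < 256 := hb b (by simp)
      have hv := ih hb'
      rw [List.foldl_append]
      simp only [List.foldl_cons, List.foldl_nil, List.length_append, List.length_singleton]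
      have hpow : 2^(8 * (bs.length + 1)) = 2^(8 * bs.length) * 256 := by
        have : 8 * (bs.length + 1) = 8 * bs.length + 8 := by ring
        rw [this, pow_add]; norm_num
      rw [hpow]
      set v := bs.foldl (fun acc b => acc * 256 + b) 0
      nlinarith

-- ===== VERDICT (by name: the statement is the Claim_ definition above) =====
theorem text_to_bits_spec : Claim_equal_text_to_bits := by
  intro text hdom
  unfold Spec_text_to_bits text_to_bits text_to_bits_alt
  have hb : ∀ b ∈ pvBytes text, b < 256 := by
    intro b hbmem
    unfold pvBytes at hbmem
    obtain ⟨c, hc, rfl⟩ := List.mem_map.mp hbmem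
    have := List.all_eq_true.mp hdom c hc
    simp [pvDomChar] at this
    omega
  by_cases hnil : pvBytes text = []
  · simp [hnil]
  · rw [if_neg hnil]
    exact ((pv_A_flat (pvBytes text)).trans (pv_main (pvBytes text) hb).symm).trans
      (pv_pad (8 * (pvBytes text).length) _ (pv_val_lt (pvBytes text) hb)).symm
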